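-- pv_equiv track=rewrite | github.com/astridwoloszczuk-dev/voice-todo | scripts/digest.py | build_todo_list
-- ===== SOURCE A (Python) =====
-- def build_todo_list(todos):
--     """Format the structured todo list section with numbers for completion replies."""
--     if not todos:
--         return ""
--
--     lines = []
--     labels = {"high": "High priority", "medium": "Medium", "low": "Low", "someday": "Someday"}
--     by_priority = {}
--     for t in todos:
--         p = t.get("priority") or "someday"
--         by_priority.setdefault(p, []).append(t)
--
--     # Todos are pre-sorted by priority — number them in that order
--     counter = 1
--     for level in ["high", "medium", "low", "someday"]:
--         items = by_priority.get(level, [])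
--         if not items:
--             continue
--         lines.append(f"*{labels[level]}*")
--         for t in items:
--             lines.append(f"{counter}. {t['text']}")
--             counter += 1
--         lines.append("")
--
--     lines.append("_Reply with numbers to tick off, e.g. 1 3_")
--     return "\n".join(lines).strip()
-- ===== SOURCE B (Python) =====
-- def build_todo_list(todos):
--     """Format the structured todo list section with numbers for completion replies."""
--     if not todos:
--         return ""
--
--     LEVELS = ["high", "medium", "low", "someday"]
--     LABELS = ["High priority", "Medium", "Low", "Someday"]
--
--     def texts_at(level):
--         return [t["text"] for t in todos if (t.get("priority") or "someday") == level]
--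
--     def section(i, start):
--         ts = texts_at(LEVELS[i])
--         if not ts:
--             return []
--         return [f"*{LABELS[i]}*"] + [f"{start + k}. {x}" for k, x in enumerate(ts)] + [""]
--
--     # each section is independent: its numbering starts after all earlier levels' items
--     counts = [len(texts_at(l)) for l in LEVELS]
--     body = [line
--             for i in range(4)
--             for line in section(i, 1 + sum(counts[:i]))]
--     return "\n".join(body + ["_Reply with numbers to tick off, e.g. 1 3_"]).strip()
-- ===== Notes on version B (the rewrite author's own statement) =====
-- stated objective: alternative
-- what changed: B removes A's by_priority grouping dict and its shared mutable counter: each priority section is built independently (filter + enumerate) and its start number is taken from the prefix-sum of the earlier levels' counts, then the sections are concatenated.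
import Mathlib
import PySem

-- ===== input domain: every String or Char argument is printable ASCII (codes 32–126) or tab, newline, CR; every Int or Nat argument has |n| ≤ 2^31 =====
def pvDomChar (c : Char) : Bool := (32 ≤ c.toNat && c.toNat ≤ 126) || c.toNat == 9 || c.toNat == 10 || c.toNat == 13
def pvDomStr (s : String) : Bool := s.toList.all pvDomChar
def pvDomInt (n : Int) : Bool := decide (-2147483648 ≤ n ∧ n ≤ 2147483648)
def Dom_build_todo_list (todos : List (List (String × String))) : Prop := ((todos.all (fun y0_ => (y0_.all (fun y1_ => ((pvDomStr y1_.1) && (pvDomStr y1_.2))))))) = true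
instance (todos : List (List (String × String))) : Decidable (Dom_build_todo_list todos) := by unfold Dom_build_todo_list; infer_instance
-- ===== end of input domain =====

-- B drops A's by_priority grouping dict and shared counter: each priority section is
-- built independently (filter + enumerate) with its start number taken from the
-- prefix-sum of the earlier levels' counts, and the sections are concatenated.


-- shared helper: the Python expression `t.get("priority") or "someday"`
-- (missing key or empty string fall back to "someday"); both sources contain it verbatim
def pvPrio (t : List (String × String)) : String :=
  match (PySem.Dict.mk t).get? "priority" with
  | none => "someday"
  | some s => if s = "" then "someday" else s

-- shared helper: the Python expression `t["text"]`; `none` is Python's KeyError,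
-- excluded by Pre_, so the `.getD ""` default is never reached on admitted inputs
def pvText (t : List (String × String)) : String :=
  ((PySem.Dict.mk t).get? "text").getD ""

-- ===== PORT A =====
def build_todo_list (todos : List (List (String × String))) : String :=
  if todos.isEmpty then "" else
    let labels : PySem.Dict String String :=
      PySem.Dict.ofList [("high", "High priority"), ("medium", "Medium"), ("low", "Low"), ("someday", "Someday")]
    -- by_priority.setdefault(p, []).append(t)  ==  d[p] = d.get(p, []) + [t]  ==  Dict.modify
    let by_priority : PySem.Dict String (List (List (String × String))) :=
      todos.foldl (fun d t => d.modify (pvPrio t) [] (· ++ [t])) PySem.Dict.empty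
    let res : List String × Int :=
      ["high", "medium", "low", "someday"].foldl (fun (st : List String × Int) level =>
        let items := by_priority.getD level []
        if items.isEmpty then st
        else
          let st1 := (st.1 ++ ["*" ++ (labels.get? level).getD "" ++ "*"], st.2)
          let st2 := items.foldl (fun (st : List String × Int) t =>
            (st.1 ++ [PySem.Int.toStr st.2 ++ ". " ++ pvText t], st.2 + 1)) st1
          (st2.1 ++ [""], st2.2)) ([], 1)
    PySem.Str.strip (PySem.Str.join "\n" (res.1 ++ ["_Reply with numbers to tick off, e.g. 1 3_"]))

-- ===== PORT B =====
def btLevels : List String := ["high", "medium", "low", "someday"]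
def btLabels : List String := ["High priority", "Medium", "Low", "Someday"]

-- texts_at(level): texts of the todos whose effective priority is `level`
def btTextsAt (todos : List (List (String × String))) (level : String) : List String :=
  (todos.filter (fun t => pvPrio t == level)).map pvText

-- section(i, start): a self-contained block, numbered from `start` via enumerate
def btSection (todos : List (List (String × String))) (i : Nat) (start : Int) : List String :=
  let ts := btTextsAt todos (btLevels.getD i "")
  if ts.isEmpty then []
  else ("*" ++ btLabels.getD i "" ++ "*")
        :: (PySem.List.enumerate ts).map (fun p => PySem.Int.toStr (start + p.1) ++ ". " ++ p.2)
        ++ [""]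

def build_todo_list_alt (todos : List (List (String × String))) : String :=
  if todos.isEmpty then "" else
    let counts : List Int := btLevels.map (fun l => ((btTextsAt todos l).length : Int))
    let body : List String :=
      (List.range 4).flatMap (fun i => btSection todos i (1 + (counts.take i).sum))
    PySem.Str.strip (PySem.Str.join "\n" (body ++ ["_Reply with numbers to tick off, e.g. 1 3_"]))

-- ===== PRECONDITION & SPEC =====
-- Pre_ excludes exactly the inputs where A raises KeyError: a todo whose priority is
-- one of the four rendered levels but which has no "text" key (B raises there too).
def Pre_build_todo_list (todos : List (List (String × String))) : Prop :=
  ∀ t ∈ todos, pvPrio t ∈ (["high", "medium", "low", "someday"] : List String) →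
    ((PySem.Dict.mk t).get? "text").isSome
instance (todos : List (List (String × String))) : Decidable (Pre_build_todo_list todos) := by
  unfold Pre_build_todo_list; infer_instance

def pvWitness_build_todo_list : (List (List (String × String))) :=
  [[("text", "buy milk"), ("priority", "high")], [("text", "nap")]]

def Spec_build_todo_list (todos : List (List (String × String))) (out : String) : Prop := out = build_todo_list_alt todos
instance (todos : List (List (String × String))) (out : String) : Decidable (Spec_build_todo_list todos out) := by unfold Spec_build_todo_list; infer_instance

-- ===== CLAIM (what is proved, stated in full; the proofs are below) =====
def Claim_equal_build_todo_list : Prop := ∀ (todos : List (List (String × String))), Dom_build_todo_list todos → Pre_build_todo_list todos → Spec_build_todo_list todos (build_todo_list todos)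

-- ===== LEMMAS AND PROOFS =====

-- A's grouping dict looked up at a level is the filter of the todos at that level
lemma byp_getD (todos : List (List (String × String))) (l : String) :
    (todos.foldl (fun d t => d.modify (pvPrio t) [] (· ++ [t]))
      (PySem.Dict.empty : PySem.Dict String (List (List (String × String))))).getD l []
    = todos.filter (fun t => pvPrio t == l) := by
  have h := PySem.Dict.getD_foldl_modify_append
    (l := todos.map (fun t => (pvPrio t, t)))
    (d := (PySem.Dict.empty : PySem.Dict String (List (List (String × String))))) (c := l)
  rw [List.foldl_map] at h
  simp only [h, PySem.Dict.getD_empty, List.nil_append, List.filter_map, List.map_map]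
  have : ((fun p : String × List (String × String) => p.1 == l) ∘ fun t => (pvPrio t, t))
      = fun t => pvPrio t == l := rfl
  rw [this]
  have : ((fun p : String × List (String × String) => p.2) ∘ fun t => (pvPrio t, t)) = id := rfl
  rw [this, List.map_id]

-- A's inner numbering loop equals an enumerate-map starting at the incoming counter
lemma inner_enum (items : List (List (String × String))) (ls : List String) (c : Int) :
    items.foldl (fun (st : List String × Int) t =>
        (st.1 ++ [PySem.Int.toStr st.2 ++ ". " ++ pvText t], st.2 + 1)) (ls, c)
    = (ls ++ (PySem.List.enumerate (items.map pvText) c).map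
          (fun p => PySem.Int.toStr p.1 ++ ". " ++ p.2),
       c + items.length) := by
  induction items generalizing ls c with
  | nil => simp [PySem.List.enumerate_nil]
  | cons t rest ih =>
      simp only [List.foldl_cons, List.map_cons, PySem.List.enumerate_cons, List.map_cons,
        List.length_cons]
      rw [ih]
      rw [Prod.mk.injEq]
      refine ⟨by simp, by push_cast; ring⟩

-- numbering from counter c is enumerate-from-0 shifted by c (btSection's form)
lemma enum_shift (xs : List String) (c : Int) : ∀ (d : Int),
    (PySem.List.enumerate xs (c + d)).map (fun p => PySem.Int.toStr p.1 ++ ". " ++ p.2)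
    = (PySem.List.enumerate xs d).map (fun p => PySem.Int.toStr (c + p.1) ++ ". " ++ p.2) := by
  induction xs with
  | nil => intro d; simp [PySem.List.enumerate_nil]
  | cons x xs ih =>
      intro d
      simp only [PySem.List.enumerate_cons, List.map_cons]
      rw [add_assoc, ih (d + 1)]

-- one step of A's level loop, expressed with B's btSection at the incoming counter
lemma level_step (todos : List (List (String × String))) (i : Nat) (level label : String)
    (hlv : btLevels.getD i "" = level) (hlb : btLabels.getD i "" = label)
    (ls : List String) (c : Int) :
    (if (todos.filter (fun t => pvPrio t == level)).isEmpty then (ls, c)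
     else
       (((todos.filter (fun t => pvPrio t == level)).foldl
           (fun (st : List String × Int) t =>
             (st.1 ++ [PySem.Int.toStr st.2 ++ ". " ++ pvText t], st.2 + 1))
           (ls ++ ["*" ++ label ++ "*"], c)).1 ++ [""],
        ((todos.filter (fun t => pvPrio t == level)).foldl
           (fun (st : List String × Int) t =>
             (st.1 ++ [PySem.Int.toStr st.2 ++ ". " ++ pvText t], st.2 + 1))
           (ls ++ ["*" ++ label ++ "*"], c)).2))
    = (ls ++ btSection todos i c, c + ((btTextsAt todos level).length : Int)) := by
  subst hlv hlb
  simp only [btSection, btTextsAt]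
  by_cases h : (todos.filter (fun t => pvPrio t == btLevels.getD i "")) = []
  · simp only [h, List.isEmpty_nil, List.map_nil, if_true, List.append_nil, List.length_nil,
      Int.natCast_zero, add_zero]
  · have h1 : (todos.filter (fun t => pvPrio t == btLevels.getD i "")).isEmpty = false := by
      rw [Bool.eq_false_iff]; intro hh; exact h (List.isEmpty_iff.mp hh)
    have h2 : ((todos.filter (fun t => pvPrio t == btLevels.getD i "")).map pvText).isEmpty = false := by
      rw [Bool.eq_false_iff]; intro hh
      exact h (List.map_eq_nil_iff.mp (List.isEmpty_iff.mp hh))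
    simp only [h1, h2, Bool.false_eq_true, if_false]
    rw [inner_enum]
    have hs := enum_shift ((todos.filter (fun t => pvPrio t == btLevels.getD i "")).map pvText) c 0
    rw [add_zero] at hs
    rw [hs]
    simp

-- ===== VERDICT (by name: the statement is the Claim_ definition above) =====
theorem build_todo_list_spec : Claim_equal_build_todo_list := by
  intro todos _ _
  unfold Spec_build_todo_list build_todo_list build_todo_list_alt
  by_cases h : todos.isEmpty
  · simp [h]
  · simp only [h, Bool.false_eq_true, if_false]
    congr 1
    congr 1
    simp only [List.foldl_cons, List.foldl_nil, byp_getD]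
    have lab0 : (((PySem.Dict.ofList [("high", "High priority"), ("medium", "Medium"), ("low", "Low"), ("someday", "Someday")] : PySem.Dict String String)).get? "high").getD "" = "High priority" := by decide
    have lab1 : (((PySem.Dict.ofList [("high", "High priority"), ("medium", "Medium"), ("low", "Low"), ("someday", "Someday")] : PySem.Dict String String)).get? "medium").getD "" = "Medium" := by decide
    have lab2 : (((PySem.Dict.ofList [("high", "High priority"), ("medium", "Medium"), ("low", "Low"), ("someday", "Someday")] : PySem.Dict String String)).get? "low").getD "" = "Low" := by decide
    have lab3 : (((PySem.Dict.ofList [("high", "High priority"), ("medium", "Medium"), ("low", "Low"), ("someday", "Someday")] : PySem.Dict String String)).get? "someday").getD "" = "Someday" := by decide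
    simp only [lab0, lab1, lab2, lab3,
      level_step todos 0 "high" "High priority" rfl rfl,
      level_step todos 1 "medium" "Medium" rfl rfl,
      level_step todos 2 "low" "Low" rfl rfl,
      level_step todos 3 "someday" "Someday" rfl rfl]
    simp only [List.range_succ, List.range_zero, List.nil_append, List.flatMap_append,
      List.flatMap_cons, List.flatMap_nil, btLevels, List.map_cons, List.map_nil,
      List.take_succ_cons, List.take_zero, List.sum_cons, List.sum_nil,
      List.append_nil, add_zero, List.append_assoc, add_assoc]
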